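-- pv_equiv track=rewrite | github.com/hokoro/Algorithm | 해시/programmers_hash_1.py | solution
-- ===== SOURCE A (Python) =====
-- def solution(nums):
--     answer = 0
--     pocketmon_list = list()
--
--     for num in nums:
--         if len(pocketmon_list) == len(nums)//2:
--             break
--         if num not in pocketmon_list:
--             pocketmon_list.append(num)
--
--     answer = len(pocketmon_list)
--     return answer
-- ===== SOURCE B (Python) =====
-- def solution(nums):
--     # sort a copy, count distinct values by one adjacency pass, cap at len//2
--     s = sorted(nums)
--     distinct = 1 if s else 0
--     for a, b in zip(s, s[1:]):
--         if a != b: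
--             distinct += 1
--     return min(distinct, len(nums) // 2)
-- ===== Notes on version B (the rewrite author's own statement) =====
-- stated objective: faster
-- what changed: Replaces the capped membership-scan loop (an inner list scan per element, quadratic on many-distinct inputs) by sorting a copy and counting distinct values in one adjacency pass, then taking min with len(nums)//2.
import Mathlib
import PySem

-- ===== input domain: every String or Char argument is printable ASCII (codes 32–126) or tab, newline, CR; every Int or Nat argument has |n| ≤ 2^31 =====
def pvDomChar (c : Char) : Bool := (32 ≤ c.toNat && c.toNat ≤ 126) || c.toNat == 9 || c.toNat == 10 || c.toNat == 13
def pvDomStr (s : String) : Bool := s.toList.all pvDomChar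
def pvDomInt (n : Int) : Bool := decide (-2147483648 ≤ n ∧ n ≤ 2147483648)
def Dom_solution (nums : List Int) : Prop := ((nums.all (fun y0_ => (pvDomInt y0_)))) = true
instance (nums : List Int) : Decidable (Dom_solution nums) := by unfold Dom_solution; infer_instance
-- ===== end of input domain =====

-- B replaces A's capped membership-scan loop by sort-a-copy + one adjacency pass counting distinct values, capped at len//2 (alternative algorithm; return value only, neither mutates its argument).


-- ===== PORT A =====
-- the for-loop with its break: cap = len(nums)//2 (both operands nonneg, so Python // = Nat division)
def pokeLoop (cap : Nat) : List Int → List Int → List Int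
  | [], acc => acc
  | n :: rest, acc =>
    if acc.length = cap then acc
    else pokeLoop cap rest (if n ∈ acc then acc else acc ++ [n])

def solution (nums : List Int) : Int :=
  ((pokeLoop (nums.length / 2) nums []).length : Int)

-- ===== PORT B =====
-- the adjacency-pass loop of Source B: fold over zip(s, s[1:])
def adjCount (s : List Int) : Int :=
  (s.zip (s.drop 1)).foldl (fun d p => if p.1 ≠ p.2 then d + 1 else d) 0

def solution_alt (nums : List Int) : Int :=
  let s := PySem.List.sorted nums (fun x => x) false
  let distinct : Int := (if s = [] then 0 else 1) + adjCount s
  -- len(nums)//2: nonneg operands, Int division = Python floor division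
  min distinct ((nums.length : Int) / 2)

-- ===== PRECONDITION & SPEC =====
def Spec_solution (nums : List Int) (out : Int) : Prop := out = solution_alt nums
instance (nums : List Int) (out : Int) : Decidable (Spec_solution nums out) := by unfold Spec_solution; infer_instance

-- ===== CLAIM (what is proved, stated in full; the proofs are below) =====
def Claim_equal_solution : Prop := ∀ (nums : List Int), Dom_solution nums → Spec_solution nums (solution nums)

-- ===== LEMMAS AND PROOFS =====

-- A-side: one step of the membership loop
def stepA (acc : List Int) (n : Int) : List Int := if n ∈ acc then acc else acc ++ [n]

theorem length_stepA_le (acc : List Int) (n : Int) :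
    acc.length ≤ (stepA acc n).length ∧ (stepA acc n).length ≤ acc.length + 1 := by
  unfold stepA; split <;> simp

theorem length_foldl_stepA_mono (l : List Int) (acc : List Int) :
    acc.length ≤ (l.foldl stepA acc).length := by
  induction l generalizing acc with
  | nil => simp
  | cons n rest ih =>
    simp only [List.foldl_cons]
    exact le_trans (length_stepA_le acc n).1 (ih (stepA acc n))

theorem pokeLoop_length (cap : Nat) (l acc : List Int) (h : acc.length ≤ cap) :
    (pokeLoop cap l acc).length = min (l.foldl stepA acc).length cap := by
  induction l generalizing acc with
  | nil => simp [pokeLoop]; omega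
  | cons n rest ih =>
    simp only [pokeLoop, List.foldl_cons]
    by_cases hc : acc.length = cap
    · have := length_foldl_stepA_mono rest (stepA acc n)
      have := (length_stepA_le acc n).1
      simp [hc]; omega
    · have hlt : acc.length < cap := lt_of_le_of_ne h hc
      have h2 : (stepA acc n).length ≤ cap := by
        have := (length_stepA_le acc n).2; omega
      simpa [hc, stepA] using ih (stepA acc n) h2

theorem mem_stepA (acc : List Int) (n x : Int) : x ∈ stepA acc n ↔ x ∈ acc ∨ x = n := by
  unfold stepA; split <;> simp_all

theorem nodup_stepA (acc : List Int) (n : Int) (h : acc.Nodup) : (stepA acc n).Nodup := by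
  unfold stepA; split
  · exact h
  · next hn =>
    rw [List.nodup_append]
    exact ⟨h, List.nodup_singleton n, fun a ha b hb => by simp at hb; subst hb; exact fun h' => hn (h' ▸ ha)⟩

theorem foldl_stepA_nodup (l acc : List Int) (h : acc.Nodup) : (l.foldl stepA acc).Nodup := by
  induction l generalizing acc with
  | nil => simpa
  | cons n rest ih => exact ih _ (nodup_stepA acc n h)

theorem foldl_stepA_toFinset (l acc : List Int) :
    (l.foldl stepA acc).toFinset = acc.toFinset ∪ l.toFinset := by
  induction l generalizing acc with
  | nil => simp
  | cons n rest ih =>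
    simp only [List.foldl_cons, ih]
    ext x
    simp [mem_stepA, List.mem_toFinset]
    tauto

-- A's uncapped loop collects exactly the distinct values
theorem foldl_stepA_length (l : List Int) :
    (l.foldl stepA []).length = l.toFinset.card := by
  have hn := foldl_stepA_nodup l [] (by simp)
  have := foldl_stepA_toFinset l []
  simp at this
  rw [← this, List.toFinset_card_of_nodup hn]

-- foldl of the adjacency counter from an arbitrary accumulator
theorem adj_foldl_shift (z : List (Int × Int)) (c : Int) :
    z.foldl (fun d p => if p.1 ≠ p.2 then d + 1 else d) c
      = c + z.foldl (fun d p => if p.1 ≠ p.2 then d + 1 else d) 0 := by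
  induction z generalizing c with
  | nil => simp
  | cons p t ih =>
    simp only [List.foldl_cons]
    rw [ih, ih (if p.1 ≠ p.2 then (0:Int) + 1 else 0)]
    split <;> ring

-- B-side: adjacency count on a weakly increasing list counts the distinct values
theorem adj_spec : ∀ s : List Int, s.Pairwise (· ≤ ·) →
    (if s = [] then (0:Int) else 1) + adjCount s = s.toFinset.card := by
  intro s
  induction s with
  | nil => simp [adjCount]
  | cons x t ih =>
    intro hp
    cases t with
    | nil => simp [adjCount]
    | cons y u =>
      have hp' : (y :: u).Pairwise (· ≤ ·) := hp.tail
      have hxy : x ≤ y := (List.pairwise_cons.mp hp).1 y (by simp)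
      have hxu : ∀ z ∈ u, x ≤ z := fun z hz => (List.pairwise_cons.mp hp).1 z (by simp [hz])
      have ihv := ih hp'
      simp only [adjCount, List.drop_one, List.tail_cons, List.zip_cons_cons,
        List.foldl_cons] at ihv ⊢
      rw [adj_foldl_shift]
      by_cases hxyeq : x = y
      · subst hxyeq
        have hfs : (x :: x :: u).toFinset = (x :: u).toFinset := by simp
        rw [hfs]
        simp at ihv ⊢
        omega
      · have hxnot : x ∉ (y :: u) := by
          intro hmem
          rcases List.mem_cons.mp hmem with h | h
          · exact hxyeq h
          · have hyz : y ≤ x := (List.pairwise_cons.mp hp').1 x h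
            exact hxyeq (le_antisymm hxy hyz)
        have hcard : (x :: y :: u).toFinset.card = (y :: u).toFinset.card + 1 := by
          rw [List.toFinset_cons, Finset.card_insert_of_notMem (by simpa using hxnot)]
        rw [hcard]
        simp [hxyeq] at ihv ⊢
        omega

theorem solution_spec : Claim_equal_solution := by
  intro nums _
  unfold Spec_solution solution solution_alt
  show ((pokeLoop (nums.length / 2) nums []).length : Int)
      = min ((if PySem.List.sorted nums (fun x => x) false = [] then (0:Int) else 1)
          + adjCount (PySem.List.sorted nums (fun x => x) false)) ((nums.length : Int) / 2)
  set s := PySem.List.sorted nums (fun x => x) false with hs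
  have hperm : s.Perm nums := PySem.List.sorted_perm nums (fun x => x) false
  have hpair : s.Pairwise (· ≤ ·) := by
    simpa using PySem.List.sorted_pairwise nums (fun x => x)
  have hfin : s.toFinset = nums.toFinset := by
    ext z; simp [List.mem_toFinset, hperm.mem_iff]
  have hB : (if s = [] then (0:Int) else 1) + adjCount s = nums.toFinset.card := by
    rw [adj_spec s hpair, hfin]
  have hA : (pokeLoop (nums.length / 2) nums []).length
      = min (nums.toFinset.card) (nums.length / 2) := by
    rw [pokeLoop_length (nums.length / 2) nums [] (by simp), foldl_stepA_length]
  rw [hA, hB]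
  have hlen : ((nums.length : Int)) / 2 = ((nums.length / 2 : Nat) : Int) := by
    exact (Int.natCast_div nums.length 2).symm
  rw [hlen]
  omega
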